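-- pv_equiv track=rewrite | github.com/fabianmarcoci/Python | Lab2/Exercises/Ex9.py | field_vision
-- ===== SOURCE A (Python) =====
-- def field_vision(matrix):
--     positions = []
--
--     for j in range(len(matrix[0])):
--         max = 0
--         for i in range(len(matrix)):
--             if matrix[i][j] <= max:
--                 positions.append((i, j))
--             if max < matrix[i][j]:
--                 max = matrix[i][j]
--
--     return positions
-- ===== SOURCE B (Python) =====
-- def field_vision(matrix):
--     return [(i, j)
--             for j in range(len(matrix[0]))
--             for i in range(len(matrix))
--             if matrix[i][j] <= max([0] + [matrix[k][j] for k in range(i)])]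
-- ===== Notes on version B (the rewrite author's own statement) =====
-- stated objective: simpler
-- what changed: A keeps a mutable running column maximum updated after each check; B is a stateless comprehension that for each cell recomputes max([0] + column prefix above it) from scratch, eliminating all loop state.
import Mathlib
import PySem

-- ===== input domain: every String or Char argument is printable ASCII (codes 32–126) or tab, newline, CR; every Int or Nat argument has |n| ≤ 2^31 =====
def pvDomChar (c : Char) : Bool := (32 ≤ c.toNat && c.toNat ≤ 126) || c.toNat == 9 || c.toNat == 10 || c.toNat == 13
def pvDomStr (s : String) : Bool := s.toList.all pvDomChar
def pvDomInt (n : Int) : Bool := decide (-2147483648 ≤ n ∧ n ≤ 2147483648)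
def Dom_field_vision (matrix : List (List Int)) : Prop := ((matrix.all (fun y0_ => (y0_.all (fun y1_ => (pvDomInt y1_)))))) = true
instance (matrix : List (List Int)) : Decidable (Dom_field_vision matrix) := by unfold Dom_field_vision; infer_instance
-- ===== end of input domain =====

-- B replaces A's stateful running-column-maximum scan by a stateless comprehension that, for
-- each cell, recomputes max([0] + the column prefix above it) from scratch (objective: simpler).

-- ===== PORT A =====
-- inner-loop body of A: 'if matrix[i][j] <= max: positions.append((i, j)); if max < matrix[i][j]: max = matrix[i][j]'
def pvStepA (matrix : List (List Int)) (j : Int) (st : List (Int × Int) × Int) (i : Int) : List (Int × Int) × Int :=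
  let v := PySem.List.pyGetD (PySem.List.pyGetD matrix i ([] : List Int)) j 0
  let st1 := if v ≤ st.2 then (st.1 ++ [(i, j)], st.2) else st
  if st1.2 < v then (st1.1, v) else st1

def field_vision (matrix : List (List Int)) : List (Int × Int) :=
  (PySem.List.pyRange 0 (((PySem.List.pyGetD matrix 0 ([] : List Int)).length : Int)) 1).foldl
    (fun positions j =>
      ((PySem.List.pyRange 0 ((matrix.length : Int)) 1).foldl (pvStepA matrix j) (positions, 0)).1)
    []

-- ===== PORT B =====
-- B's filter condition: 'matrix[i][j] <= max([0] + [matrix[k][j] for k in range(i)])'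
def pvCondB (matrix : List (List Int)) (j i : Int) : Bool :=
  PySem.List.pyGetD (PySem.List.pyGetD matrix i ([] : List Int)) j 0 ≤
    (PySem.List.max?
      ((0 : Int) :: (PySem.List.pyRange 0 i 1).map
        (fun k => PySem.List.pyGetD (PySem.List.pyGetD matrix k ([] : List Int)) j 0))
      (fun y => y)).getD 0

-- the comprehension: flatMap over j, filter over i
def field_vision_alt (matrix : List (List Int)) : List (Int × Int) :=
  (PySem.List.pyRange 0 (((PySem.List.pyGetD matrix 0 ([] : List Int)).length : Int)) 1).flatMap
    (fun j =>
      (PySem.List.pyRange 0 ((matrix.length : Int)) 1).filterMap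
        (fun i => if pvCondB matrix j i then some (i, j) else none))

-- ===== PRECONDITION & SPEC =====
-- Pre_ excludes exactly the inputs on which Python A raises IndexError: the empty matrix
-- (matrix[0]) and matrices with a row shorter than the first row (matrix[i][j]).
def Pre_field_vision (matrix : List (List Int)) : Prop :=
  matrix ≠ [] ∧ ∀ row ∈ matrix, matrix.headI.length ≤ row.length
instance (matrix : List (List Int)) : Decidable (Pre_field_vision matrix) := by
  unfold Pre_field_vision; infer_instance

def pvWitness_field_vision : List (List Int) := [[1, 2], [3, 0]]

def Spec_field_vision (matrix : List (List Int)) (out : List (Int × Int)) : Prop := out = field_vision_alt matrix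
instance (matrix : List (List Int)) (out : List (Int × Int)) : Decidable (Spec_field_vision matrix out) := by unfold Spec_field_vision; infer_instance

-- ===== CLAIM (what is proved, stated in full; the proofs are below) =====
def Claim_equal_field_vision : Prop := ∀ (matrix : List (List Int)), Dom_field_vision matrix → Pre_field_vision matrix → Spec_field_vision matrix (field_vision matrix)

-- ===== LEMMAS AND PROOFS =====

-- value of cell (i, j) as both ports read it (default 0 out of range)
def pvV (matrix : List (List Int)) (i j : Nat) : Int := (matrix.getD i []).getD j 0

def pvUpd (mx v : Int) : Int := if v ≤ mx then mx else v

-- running column maximum after the first r rows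
def pvCMax (matrix : List (List Int)) : Nat → Nat → Int
  | 0, _ => 0
  | r + 1, j => pvUpd (pvCMax matrix r j) (pvV matrix r j)

-- hits of column j among the first r rows
def pvHits (matrix : List (List Int)) : Nat → Nat → List (Int × Int)
  | 0, _ => []
  | r + 1, j =>
    pvHits matrix r j ++
      (if pvV matrix r j ≤ pvCMax matrix r j then [((r : Int), (j : Int))] else [])

lemma pvA_inner (M : List (List Int)) (jn : Nat) :
    ∀ (r : Nat) (acc : List (Int × Int)),
      (PySem.List.pyRange 0 ((r : Int)) 1).foldl (pvStepA M ((jn : Int))) (acc, 0)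
        = (acc ++ pvHits M r jn, pvCMax M r jn) := by
  intro r
  induction r with
  | zero => intro acc; simp [pvHits, pvCMax]
  | succ r ih =>
    intro acc
    rw [show ((r + 1 : Nat) : Int) = ((r : Nat) : Int) + 1 by push_cast; ring,
      PySem.List.pyRange_one_succ_right (Int.natCast_nonneg r), List.foldl_append, ih]
    simp only [List.foldl_cons, List.foldl_nil, pvStepA, PySem.List.pyGetD_natCast,
      List.getD_eq_getElem?_getD]
    by_cases h : (M[r]?.getD ([] : List Int))[jn]?.getD 0 ≤ pvCMax M r jn
    · rw [if_pos h]
      dsimp only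
      rw [if_neg (not_lt.mpr h)]
      simp [pvHits, pvCMax, pvUpd, pvV, h]
    · rw [if_neg h]
      dsimp only
      rw [if_pos (not_le.mp h)]
      simp [pvHits, pvCMax, pvUpd, pvV, h]

lemma pvA_outer (M : List (List Int)) :
    ∀ (mm : Nat) (acc : List (Int × Int)),
      (PySem.List.pyRange 0 ((mm : Int)) 1).foldl
          (fun positions j =>
            ((PySem.List.pyRange 0 ((M.length : Int)) 1).foldl (pvStepA M j) (positions, 0)).1)
          acc
        = acc ++ (List.range mm).flatMap (fun jn => pvHits M M.length jn) := by
  intro mm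
  induction mm with
  | zero => intro acc; simp
  | succ mm ih =>
    intro acc
    rw [show ((mm + 1 : Nat) : Int) = ((mm : Nat) : Int) + 1 by push_cast; ring,
      PySem.List.pyRange_one_succ_right (Int.natCast_nonneg mm), List.foldl_append, ih]
    simp only [List.foldl_cons, List.foldl_nil]
    rw [pvA_inner M mm M.length]
    simp [List.range_succ]

lemma pvA_closed (M : List (List Int)) :
    field_vision M
      = (List.range (M.getD 0 []).length).flatMap (fun jn => pvHits M M.length jn) := by
  unfold field_vision
  rw [PySem.List.pyGetD_zero, pvA_outer M (M.getD 0 []).length []]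
  simp

-- A's running maximum is the plain maximum of 0 and the column prefix
lemma pvCMax_eq_foldl (M : List (List Int)) (j : Nat) :
    ∀ (r : Nat), pvCMax M r j = ((List.range r).map (fun k => pvV M k j)).foldl max 0 := by
  intro r
  induction r with
  | zero => simp [pvCMax]
  | succ r ih =>
    rw [List.range_succ]
    simp only [List.map_append, List.foldl_append, List.map_cons, List.map_nil,
      List.foldl_cons, List.foldl_nil, pvCMax, ih]
    unfold pvUpd
    omega

-- A's column hits as a stateless filter over row indices
lemma pvHits_eq_filterMap (M : List (List Int)) (j : Nat) :
    ∀ (r : Nat),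
      pvHits M r j
        = (List.range r).filterMap
            (fun i => if pvV M i j ≤ pvCMax M i j then some ((i : Int), (j : Int)) else none) := by
  intro r
  induction r with
  | zero => simp [pvHits]
  | succ r ih =>
    rw [List.range_succ, List.filterMap_append, ← ih]
    simp only [pvHits, List.filterMap_cons, List.filterMap_nil]
    by_cases h : pvV M r j ≤ pvCMax M r j <;> simp [h]

-- B's condition at Nat indices is exactly A's check against the running maximum
lemma pvCondB_eq (M : List (List Int)) (jn i : Nat) :
    pvCondB M ((jn : Int)) ((i : Int)) = decide (pvV M i jn ≤ pvCMax M i jn) := by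
  unfold pvCondB
  rw [PySem.List.max?_id_cons, Option.getD_some, PySem.List.pyRange_zero_natCast]
  rw [List.map_map]
  have : ((fun k => PySem.List.pyGetD (PySem.List.pyGetD M k ([] : List Int)) ((jn : Int)) 0) ∘
      (fun (k : Nat) => ((k : Int)))) = fun k => pvV M k jn := by
    funext k
    simp [pvV, PySem.List.pyGetD_natCast]
  rw [this, ← pvCMax_eq_foldl]
  simp [pvV, PySem.List.pyGetD_natCast]

lemma pvB_closed (M : List (List Int)) :
    field_vision_alt M
      = (List.range (M.getD 0 []).length).flatMap (fun jn => pvHits M M.length jn) := by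
  unfold field_vision_alt
  rw [PySem.List.pyGetD_zero]
  simp only [PySem.List.pyRange_zero_natCast]
  rw [List.flatMap_map]
  apply List.flatMap_congr
  intro jn _
  rw [List.filterMap_map, pvHits_eq_filterMap]
  apply List.filterMap_congr
  intro i _
  simp only [Function.comp_apply, pvCondB_eq]
  by_cases h : pvV M i jn ≤ pvCMax M i jn <;> simp [h]

-- ===== VERDICT (by name: the statement is the Claim_ definition above) =====
theorem field_vision_spec : Claim_equal_field_vision := by
  intro M _ _
  unfold Spec_field_vision
  rw [pvA_closed, pvB_closed]
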